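-- pv_equiv track=rewrite | github.com/Shunpoco/leetcode | maximum-xor-for-each-query/main.py | getMaximumXor
-- ===== SOURCE A (Python) =====
-- from typing import List
--
-- def getMaximumXor(nums: List[int], maximumBit: int) -> List[int]:
--     prefixes = [0 for _ in range(len(nums))]
--     prefixes[0] = nums[0]
--
--     for i in range(1, len(nums)):
--         prefixes[i] = prefixes[i-1] ^ nums[i]
--
--     result = [0 for _ in range(len(nums))]
--
--     mask = (1 << maximumBit) - 1
--
--     for i in range(len(nums)):
--         cur = prefixes[len(prefixes)-1-i]
--         result[i] = cur ^ mask
--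
--     return result
-- ===== SOURCE B (Python) =====
-- from typing import List
--
-- def getMaximumXor(nums: List[int], maximumBit: int) -> List[int]:
--     mask = (1 << maximumBit) - 1
--     total = nums[0]
--     for x in nums[1:]:
--         total ^= x
--     result = []
--     n = len(nums)
--     for i in range(n):
--         result.append(total ^ mask)
--         total ^= nums[n - 1 - i]
--     return result
-- ===== Notes on version B (the rewrite author's own statement) =====
-- stated objective: simpler
-- what changed: B replaces A's materialised prefix-XOR array plus a second indexed pass (read back-to-front into a preallocated result) by a single running XOR accumulator: total starts as the XOR of all elements, each emitted entry is total ^ mask and the last remaining element is XOR-ed out afterwards.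
import Mathlib
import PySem

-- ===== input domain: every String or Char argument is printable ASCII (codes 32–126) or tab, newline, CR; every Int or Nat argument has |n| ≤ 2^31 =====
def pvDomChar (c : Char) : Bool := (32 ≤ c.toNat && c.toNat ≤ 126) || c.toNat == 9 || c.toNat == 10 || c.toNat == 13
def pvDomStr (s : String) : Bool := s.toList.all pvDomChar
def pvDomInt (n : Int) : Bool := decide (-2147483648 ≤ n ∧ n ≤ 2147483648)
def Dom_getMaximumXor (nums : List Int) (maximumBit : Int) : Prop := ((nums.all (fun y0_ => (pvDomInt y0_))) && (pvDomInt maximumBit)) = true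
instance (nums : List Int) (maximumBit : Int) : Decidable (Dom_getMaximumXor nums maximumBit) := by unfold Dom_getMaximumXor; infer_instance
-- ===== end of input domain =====

-- B maintains one running XOR accumulator instead of A's prefix array + second indexed pass (same O(n) time, O(1) extra space).
-- Equivalence of return values is proved on Pre_: nonempty nums (A raises IndexError on []) and 0 <= maximumBit (1 << negative raises).
-- ===== PORT A =====
def getMaximumXor (nums : List Int) (maximumBit : Int) : List Int :=
  -- prefixes = [0]*n; prefixes[0] = nums[0]  (nums[0] raises on []: excluded by Pre_)
  let prefixes0 : List Int :=
    (List.replicate nums.length 0).set 0 ((PySem.List.pyGet? nums 0).getD 0)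
  -- for i in range(1, len(nums)): prefixes[i] = prefixes[i-1] ^ nums[i]
  let prefixes : List Int :=
    (PySem.List.pyRange 1 nums.length 1).foldl
      (fun p i => p.set i.toNat (PySem.Int.bxor (PySem.List.pyGetD p (i - 1) 0) (PySem.List.pyGetD nums i 0)))
      prefixes0
  -- mask = (1 << maximumBit) - 1  (maximumBit >= 0 by Pre_)
  let mask : Int := (1 <<< maximumBit.toNat) - 1
  -- for i in range(len(nums)): result[i] = prefixes[len(prefixes)-1-i] ^ mask
  (PySem.List.pyRange 0 nums.length 1).foldl
    (fun r i => r.set i.toNat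
      (PySem.Int.bxor (PySem.List.pyGetD prefixes ((prefixes.length : Int) - 1 - i) 0) mask))
    (List.replicate nums.length 0)

-- ===== PORT B =====
def getMaximumXor_alt (nums : List Int) (maximumBit : Int) : List Int :=
  let mask : Int := (1 <<< maximumBit.toNat) - 1
  -- total = nums[0]; for x in nums[1:]: total ^= x
  let total : Int :=
    (PySem.List.slice nums (some 1) none).foldl (fun t x => PySem.Int.bxor t x)
      ((PySem.List.pyGet? nums 0).getD 0)
  -- for i in range(n): result.append(total ^ mask); total ^= nums[n-1-i]
  ((PySem.List.pyRange 0 nums.length 1).foldl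
    (fun (st : List Int × Int) i =>
      (st.1 ++ [PySem.Int.bxor st.2 mask], PySem.Int.bxor st.2 (PySem.List.pyGetD nums ((nums.length : Int) - 1 - i) 0)))
    ([], total)).1

-- ===== PRECONDITION & SPEC =====
-- A raises IndexError on nums = [] and ValueError (negative shift) on maximumBit < 0.
def Pre_getMaximumXor (nums : List Int) (maximumBit : Int) : Prop :=
  nums ≠ [] ∧ 0 ≤ maximumBit
instance (nums : List Int) (maximumBit : Int) : Decidable (Pre_getMaximumXor nums maximumBit) := by
  unfold Pre_getMaximumXor; infer_instance
def pvWitness_getMaximumXor : List Int × Int := ([3, 1, 2], 2)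
def Spec_getMaximumXor (nums : List Int) (maximumBit : Int) (out : List Int) : Prop := out = getMaximumXor_alt nums maximumBit
instance (nums : List Int) (maximumBit : Int) (out : List Int) : Decidable (Spec_getMaximumXor nums maximumBit out) := by unfold Spec_getMaximumXor; infer_instance

-- ===== CLAIM (what is proved, stated in full; the proofs are below) =====
def Claim_equal_getMaximumXor : Prop := ∀ (nums : List Int) (maximumBit : Int), Dom_getMaximumXor nums maximumBit → Pre_getMaximumXor nums maximumBit → Spec_getMaximumXor nums maximumBit (getMaximumXor nums maximumBit)

-- ===== LEMMAS AND PROOFS =====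

-- XOR of the first k elements of nums.
def xorPre (nums : List Int) (k : Nat) : Int := (nums.take k).foldl (fun t x => PySem.Int.bxor t x) 0

theorem xorPre_succ (nums : List Int) (k : Nat) (hk : k < nums.length) :
    xorPre nums (k + 1) = PySem.Int.bxor (xorPre nums k) nums[k] := by
  unfold xorPre
  rw [List.take_add_one, List.getElem?_eq_getElem hk, Option.toList_some,
     List.foldl_append, List.foldl_cons, List.foldl_nil]

theorem bxor_cancel (a b : Int) : PySem.Int.bxor (PySem.Int.bxor a b) b = a := by
  have h1 : ∀ n : ℕ, ¬((n:Int) ≤ -1) := by intro n; omega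
  have h4 : ∀ n : ℕ, ¬(1 ≤ -(n:Int)) := by intro n; omega
  rcases a with m|m <;> rcases b with n|n <;>
    simp [PySem.Int.bxor, Int.negSucc_eq, h1, h4, Nat.xor_xor_cancel_right] <;> omega

-- A's first loop fills prefixes[0..m) with the running prefix XORs.
theorem prefix_loop (nums : List Int) (hne : nums ≠ []) (m : Nat) (h1 : 1 ≤ m)
    (hm : m ≤ nums.length) :
    (PySem.List.pyRange 1 (m : Int) 1).foldl
      (fun p i => p.set i.toNat (PySem.Int.bxor (PySem.List.pyGetD p (i - 1) 0) (PySem.List.pyGetD nums i 0)))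
      ((List.replicate nums.length 0).set 0 ((PySem.List.pyGet? nums 0).getD 0))
    = (List.range m).map (fun i => xorPre nums (i + 1)) ++ List.replicate (nums.length - m) 0 := by
  induction m with
  | zero => omega
  | succ m ih =>
    rcases Nat.eq_zero_or_pos m with hm0 | hm1
    · subst hm0
      rw [show ((1:Nat) : Int) = 1 by norm_num, PySem.List.pyRange_one_eq_nil (by norm_num),
          List.foldl_nil]
      have hn : 0 < nums.length := List.length_pos_of_ne_nil hne
      obtain ⟨k, hk⟩ : ∃ k, nums.length = k + 1 := ⟨nums.length - 1, by omega⟩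
      have hget : (PySem.List.pyGet? nums 0).getD 0 = nums[0]'hn := by
        rw [show (0 : Int) = ((0 : Nat) : Int) by norm_num, PySem.List.pyGet?_natCast,
            List.getElem?_eq_getElem hn, Option.getD_some]
      rw [hk, List.replicate_succ, List.set_cons_zero, hget]
      simp [xorPre, List.take_one, List.head?_eq_getElem?, List.getElem?_eq_getElem hn,
            PySem.Int.bxor_comm 0, List.foldl_cons]
    · have hcast : ((m + 1 : Nat) : Int) = (m : Int) + 1 := by push_cast; ring
      rw [hcast, PySem.List.pyRange_one_succ_right (by exact_mod_cast hm1), List.foldl_append,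
          List.foldl_cons, List.foldl_nil, ih hm1 (by omega)]
      -- the written value: p[m-1] ^ nums[m] = xorPre nums (m+1)
      have hmn : m < nums.length := by omega
      have hi1 : ((m : Int) - 1) = ((m - 1 : Nat) : Int) := by omega
      have hrd : PySem.List.pyGetD
          ((List.range m).map (fun i => xorPre nums (i + 1)) ++ List.replicate (nums.length - m) 0)
          ((m : Int) - 1) 0 = xorPre nums m := by
        rw [hi1, PySem.List.pyGetD_natCast]
        rw [List.getD_eq_getElem?_getD, List.getElem?_append_left (by simp; omega)]
        rw [List.getElem?_map, List.getElem?_range (by omega)]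
        simp only [Option.map_some, Option.getD_some]
        congr 1
        omega
      have hrd2 : PySem.List.pyGetD nums (m : Int) 0 = nums[m]'hmn := by
        rw [PySem.List.pyGetD_natCast, List.getD_eq_getElem?_getD,
            List.getElem?_eq_getElem hmn, Option.getD_some]
      rw [hrd, hrd2, Int.toNat_natCast]
      rw [List.set_append_right _ _ (by simp)]
      obtain ⟨k, hk⟩ : ∃ k, nums.length - m = k + 1 := ⟨nums.length - m - 1, by omega⟩
      rw [hk, List.replicate_succ]
      simp only [List.length_map, List.length_range, Nat.sub_self, List.set_cons_zero]
      rw [show nums.length - (m + 1) = k from by omega, List.range_succ, List.map_append,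
          List.append_assoc, ← xorPre_succ nums m hmn]
      simp only [List.map_cons, List.map_nil, List.cons_append, List.nil_append]

-- A's second loop writes f(i) into slot i of a zero array, i = 0..n-1.
theorem fill_loop (f : Int → Int) (n : Nat) (m : Nat) (hm : m ≤ n) :
    (PySem.List.pyRange 0 (m : Int) 1).foldl
      (fun r i => r.set i.toNat (f i)) (List.replicate n 0)
    = (List.range m).map (fun k : Nat => f (k : Int)) ++ List.replicate (n - m) 0 := by
  induction m with
  | zero =>
    rw [show ((0:Nat) : Int) = 0 by norm_num, PySem.List.pyRange_one_eq_nil (by norm_num),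
        List.foldl_nil]
    simp
  | succ m ih =>
    have hcast : ((m + 1 : Nat) : Int) = (m : Int) + 1 := by push_cast; ring
    rw [hcast, PySem.List.pyRange_one_succ_right (by positivity), List.foldl_append,
        List.foldl_cons, List.foldl_nil, ih (by omega)]
    rw [Int.toNat_natCast, List.set_append_right _ _ (by simp)]
    obtain ⟨k, hk⟩ : ∃ k, n - m = k + 1 := ⟨n - m - 1, by omega⟩
    rw [hk, List.replicate_succ]
    simp only [List.length_map, List.length_range, Nat.sub_self, List.set_cons_zero]
    rw [show n - (m + 1) = k from by omega, List.range_succ, List.map_append, List.append_assoc]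
    simp only [List.map_cons, List.map_nil, List.cons_append, List.nil_append]

-- B's initial accumulator is the XOR of all of nums.
theorem total_eq (nums : List Int) (hne : nums ≠ []) :
    (PySem.List.slice nums (some 1) none).foldl (fun t x => PySem.Int.bxor t x)
      ((PySem.List.pyGet? nums 0).getD 0) = xorPre nums nums.length := by
  rcases nums with _ | ⟨x, xs⟩
  · exact absurd rfl hne
  · rw [show (1 : Int) = ((1 : Nat) : Int) by norm_num, PySem.List.slice_from_natCast]
    simp [xorPre, List.take_of_length_le, PySem.List.pyGet?, PySem.List.pyIdx?,
          PySem.Int.bxor_comm 0]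

-- B's loop: after m iterations the output holds the first m answers and the
-- accumulator is the XOR of the first n-m elements.
theorem alt_loop (nums : List Int) (mask : Int) (m : Nat) (hm : m ≤ nums.length) :
    (PySem.List.pyRange 0 (m : Int) 1).foldl
      (fun (st : List Int × Int) i =>
        (st.1 ++ [PySem.Int.bxor st.2 mask],
         PySem.Int.bxor st.2 (PySem.List.pyGetD nums ((nums.length : Int) - 1 - i) 0)))
      ([], xorPre nums nums.length)
    = ((List.range m).map (fun j => PySem.Int.bxor (xorPre nums (nums.length - j)) mask),
       xorPre nums (nums.length - m)) := by
  induction m with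
  | zero =>
    rw [show ((0:Nat) : Int) = 0 by norm_num, PySem.List.pyRange_one_eq_nil (by norm_num),
        List.foldl_nil]
    simp
  | succ m ih =>
    have hcast : ((m + 1 : Nat) : Int) = (m : Int) + 1 := by push_cast; ring
    rw [hcast, PySem.List.pyRange_one_succ_right (by positivity), List.foldl_append,
        List.foldl_cons, List.foldl_nil, ih (by omega)]
    have hlt : nums.length - 1 - m < nums.length := by omega
    have hidx : ((nums.length : Int) - 1 - (m : Int)) = ((nums.length - 1 - m : Nat) : Int) := by
      omega
    have hrd : PySem.List.pyGetD nums ((nums.length : Int) - 1 - (m : Int)) 0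
        = nums[nums.length - 1 - m]'hlt := by
      rw [hidx, PySem.List.pyGetD_natCast, List.getD_eq_getElem?_getD,
          List.getElem?_eq_getElem hlt, Option.getD_some]
    have hstep : PySem.Int.bxor (xorPre nums (nums.length - m))
        (PySem.List.pyGetD nums ((nums.length : Int) - 1 - (m : Int)) 0)
        = xorPre nums (nums.length - (m + 1)) := by
      rw [hrd, show nums.length - m = (nums.length - 1 - m) + 1 by omega,
          xorPre_succ nums _ hlt, bxor_cancel]
      congr 1
      omega
    rw [hstep]
    refine Prod.ext ?_ rfl
    simp only [List.range_succ, List.map_append, List.map_cons, List.map_nil]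

-- ===== VERDICT (by name: the statement is the Claim_ definition above) =====
theorem getMaximumXor_spec : Claim_equal_getMaximumXor := by
  intro nums maximumBit _ hpre
  obtain ⟨hne, _⟩ := hpre
  have hn : 0 < nums.length := List.length_pos_of_ne_nil hne
  unfold Spec_getMaximumXor getMaximumXor getMaximumXor_alt
  simp only []
  rw [prefix_loop nums hne nums.length hn le_rfl, Nat.sub_self, List.replicate_zero,
      List.append_nil, fill_loop _ nums.length nums.length le_rfl, Nat.sub_self,
      List.replicate_zero, List.append_nil, total_eq nums hne,
      alt_loop nums ((1 <<< maximumBit.toNat) - 1) nums.length le_rfl]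
  dsimp only
  apply List.map_congr_left
  intro k hk
  rw [List.mem_range] at hk
  have hlen : ((List.range nums.length).map (fun i => xorPre nums (i + 1))).length
      = nums.length := by simp
  have hidx : ((((List.range nums.length).map (fun i => xorPre nums (i + 1))).length : Int)
      - 1 - (k : Int)) = ((nums.length - 1 - k : Nat) : Int) := by
    rw [hlen]; omega
  rw [hidx, PySem.List.pyGetD_natCast, List.getD_eq_getElem?_getD, List.getElem?_map,
      List.getElem?_range (by omega)]
  simp only [Option.map_some, Option.getD_some]
  congr 2
  omega

-- Dom/Pre sanity: the stated witness is admissible.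
theorem pvWitness_getMaximumXor_ok :
    Dom_getMaximumXor pvWitness_getMaximumXor.1 pvWitness_getMaximumXor.2 ∧
    Pre_getMaximumXor pvWitness_getMaximumXor.1 pvWitness_getMaximumXor.2 := by
  constructor <;> decide
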